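-- pv_equiv track=rewrite | github.com/speechcatcher-asr/speechcatcher-data | data_server/whisper_benchmark.py | extract_text_from_vtt
-- ===== SOURCE A (Python) =====
-- def extract_text_from_vtt(vtt_content):
--     """Extract pure text from a vtt file, without the timestamps"""
--     lines = vtt_content.splitlines()
--     text_lines = []
--     skip_header = True
--
--     for line in lines:
--         # Skip empty lines
--         if not line.strip():
--             continue
--
--         # Skip header lines
--         if skip_header:
--             if line.strip() == 'WEBVTT':
--                 continue
--             else:
--                 skip_header = False
--
--         # Skip timestamp lines
--         if '-->' in line:
--             continue
--
--         # Add text lines to the list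
--         text_lines.append(line.strip())
--
--     text_only = '\n'.join(text_lines).strip()
--     return text_only
-- ===== SOURCE B (Python) =====
-- def extract_text_from_vtt(vtt_content):
--     """Extract pure text from a vtt file, without the timestamps"""
--     nonempty = [line for line in vtt_content.splitlines() if line.strip()]
--     i = 0
--     while i < len(nonempty) and nonempty[i].strip() == 'WEBVTT':
--         i += 1
--     body = [line.strip() for line in nonempty[i:] if '-->' not in line]
--     return '\n'.join(body).strip()
-- ===== Notes on version B (the rewrite author's own statement) =====
-- stated objective: alternative
-- what changed: Replaces the single stateful loop with a skip_header flag by a three-stage pipeline: filter out blank lines, drop the leading run of WEBVTT header lines by index, then one comprehension keeping non-timestamp lines stripped.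
import Mathlib
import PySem

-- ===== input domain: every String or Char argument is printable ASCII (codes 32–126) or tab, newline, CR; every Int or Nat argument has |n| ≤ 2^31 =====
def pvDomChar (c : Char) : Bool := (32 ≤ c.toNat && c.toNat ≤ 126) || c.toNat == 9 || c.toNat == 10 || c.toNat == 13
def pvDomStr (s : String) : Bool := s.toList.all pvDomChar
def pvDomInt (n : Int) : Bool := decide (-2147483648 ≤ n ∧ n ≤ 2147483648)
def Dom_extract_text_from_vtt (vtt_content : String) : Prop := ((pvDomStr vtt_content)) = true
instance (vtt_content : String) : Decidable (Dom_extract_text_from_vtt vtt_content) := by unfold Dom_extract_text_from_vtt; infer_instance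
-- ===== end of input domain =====

-- B replaces A's single stateful pass (skip_header flag) by a pipeline: filter blanks, drop the leading WEBVTT run, filter timestamps; same cost, different decomposition.


-- ===== PORT A =====
-- loop body of A: state = (text_lines, skip_header)
def vttStepA (st : List String × Bool) (line : String) : List String × Bool :=
  if PySem.Str.strip line = "" then st
  else if st.2 ∧ PySem.Str.strip line = "WEBVTT" then st
  else if PySem.Str.isIn "-->" line then (st.1, false)
  else (st.1 ++ [PySem.Str.strip line], false)

def extract_text_from_vtt (vtt_content : String) : String :=
  let lines := PySem.Str.splitlines vtt_content
  let st := lines.foldl vttStepA ([], true)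
  PySem.Str.strip (PySem.Str.join "\n" st.1)

-- ===== PORT B =====
def extract_text_from_vtt_alt (vtt_content : String) : String :=
  let nonempty := (PySem.Str.splitlines vtt_content).filter (fun l => !(PySem.Str.strip l == ""))
  -- the while loop advancing an index past the leading 'WEBVTT' run, then slicing, = dropWhile
  let rest := nonempty.dropWhile (fun l => PySem.Str.strip l == "WEBVTT")
  let body := (rest.filter (fun l => !PySem.Str.isIn "-->" l)).map PySem.Str.strip
  PySem.Str.strip (PySem.Str.join "\n" body)

-- ===== PRECONDITION & SPEC =====
def Spec_extract_text_from_vtt (vtt_content : String) (out : String) : Prop := out = extract_text_from_vtt_alt vtt_content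
instance (vtt_content : String) (out : String) : Decidable (Spec_extract_text_from_vtt vtt_content out) := by unfold Spec_extract_text_from_vtt; infer_instance

-- ===== CLAIM (what is proved, stated in full; the proofs are below) =====
def Claim_equal_extract_text_from_vtt : Prop := ∀ (vtt_content : String), Dom_extract_text_from_vtt vtt_content → Spec_extract_text_from_vtt vtt_content (extract_text_from_vtt vtt_content)

-- ===== LEMMAS AND PROOFS =====

-- once skip_header is false, A's loop just collects stripped non-blank non-timestamp lines
lemma foldA_false (lines : List String) (acc : List String) :
    lines.foldl vttStepA (acc, false)
      = (acc ++ (lines.filter (fun l => !(PySem.Str.strip l == "") && !PySem.Str.isIn "-->" l)).map PySem.Str.strip, false) := by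
  induction lines generalizing acc with
  | nil => simp
  | cons l ls ih =>
    by_cases h0 : PySem.Str.strip l = ""
    · simp [List.foldl_cons, vttStepA, h0, ih]
    · by_cases h1 : PySem.Chars.isIn ['-', '-', '>'] l.toList = true
      · simp [List.foldl_cons, vttStepA, h0, h1, ih]
      · simp [List.foldl_cons, vttStepA, h0, h1, ih (acc ++ [PySem.Str.strip l])]

-- with skip_header still true, A's loop equals B's pipeline (prefix of WEBVTT lines dropped)
lemma foldA_true (lines : List String) (acc : List String) :
    (lines.foldl vttStepA (acc, true)).1
      = acc ++ (((lines.filter (fun l => !(PySem.Str.strip l == ""))).dropWhile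
            (fun l => PySem.Str.strip l == "WEBVTT")).filter
            (fun l => !PySem.Str.isIn "-->" l)).map PySem.Str.strip := by
  induction lines generalizing acc with
  | nil => simp
  | cons l ls ih =>
    by_cases h0 : PySem.Str.strip l = ""
    · simp [List.foldl_cons, vttStepA, h0, ih]
    · by_cases hw : PySem.Str.strip l = "WEBVTT"
      · simp [List.foldl_cons, vttStepA, hw, ih]
      · by_cases h1 : PySem.Chars.isIn ['-', '-', '>'] l.toList = true
        · simp [List.foldl_cons, vttStepA, h0, hw, h1, foldA_false, List.filter_filter, Bool.and_comm]
        · simp [List.foldl_cons, vttStepA, h0, hw, h1, foldA_false, List.filter_filter, Bool.and_comm]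

-- ===== VERDICT (by name: the statement is the Claim_ definition above) =====
theorem extract_text_from_vtt_spec : Claim_equal_extract_text_from_vtt := by
  intro v _
  unfold Spec_extract_text_from_vtt extract_text_from_vtt extract_text_from_vtt_alt
  simp only [foldA_true, List.nil_append]
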